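-- pv_equiv track=rewrite | github.com/michal-sar/minimax-algorithm-api | main.py | encode_connect_four_board
-- ===== SOURCE A (Python) =====
-- def encode_connect_four_board(board: str):
--     columns = board.split(",")
--     yellow_tokens = 0
--     token_mask = 0
--     for column_index, column in enumerate(columns):
--         for token_index, token in enumerate(column):
--             if token == 'y':
--                 yellow_tokens |= 1 << (column_index * 7
--                                        + token_index)
--                 token_mask |= yellow_tokens
--             elif token == 'r':
--                 token_mask |= 1 << (column_index * 7
--                                     + token_index)
--     return yellow_tokens, token_mask
-- ===== SOURCE B (Python) =====
-- def encode_connect_four_board(board: str):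
--     yellow_tokens = 0
--     token_mask = 0
--     column_index = 0
--     token_index = 0
--     for ch in board:
--         if ch == ',':
--             column_index += 1
--             token_index = 0
--         else:
--             if ch == 'y':
--                 yellow_tokens |= 1 << (column_index * 7 + token_index)
--                 token_mask |= 1 << (column_index * 7 + token_index)
--             elif ch == 'r':
--                 token_mask |= 1 << (column_index * 7 + token_index)
--             token_index += 1
--     return yellow_tokens, token_mask
-- ===== Notes on version B (the rewrite author's own statement) =====
-- stated objective: simpler
-- what changed: B drops the split-into-columns step and the nested enumerate loops (and A's redundant re-accumulation of yellow_tokens into token_mask) for a single split-free character scan that maintains column/token counters and ORs each occupied cell's bit directly into the two masks.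
import Mathlib
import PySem

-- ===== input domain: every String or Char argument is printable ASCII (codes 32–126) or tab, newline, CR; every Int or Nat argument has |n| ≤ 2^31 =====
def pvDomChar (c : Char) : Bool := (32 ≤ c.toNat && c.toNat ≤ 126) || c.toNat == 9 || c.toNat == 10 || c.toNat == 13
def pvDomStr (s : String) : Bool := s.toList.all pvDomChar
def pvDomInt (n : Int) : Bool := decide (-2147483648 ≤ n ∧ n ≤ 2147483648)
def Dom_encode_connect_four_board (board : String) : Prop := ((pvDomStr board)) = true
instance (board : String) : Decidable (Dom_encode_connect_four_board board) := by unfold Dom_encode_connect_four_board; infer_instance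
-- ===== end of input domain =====

-- B replaces A's split-then-nested-enumerate pass (with its redundant 'token_mask |= yellow_tokens'
-- accumulation) by one split-free character scan maintaining column/token counters; simpler, same result.

-- ===== PORT A =====
-- '.getD []' is unreachable: split? is none only for an empty separator, and the separator is ",".
-- enumerate indices are ≥ 0, so '.toNat' on the shift amount is exact for Python's '1 << k'.
def encode_connect_four_board (board : String) : Int × Int :=
  let columns := (PySem.Str.split? board ",").getD []
  (PySem.List.enumerate columns).foldl
    (fun (st : Int × Int) (p : Int × String) =>
      (PySem.List.enumerate p.2.toList).foldl
        (fun (st2 : Int × Int) (q : Int × Char) =>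
          if q.2 = 'y' then
            let y := PySem.Int.bor st2.1 (1 <<< (p.1 * 7 + q.1).toNat)
            (y, PySem.Int.bor st2.2 y)
          else if q.2 = 'r' then
            (st2.1, PySem.Int.bor st2.2 (1 <<< (p.1 * 7 + q.1).toNat))
          else st2)
        st)
    (0, 0)

-- ===== PORT B =====
-- state: (yellow_tokens, token_mask, column_index, token_index); counters stay ≥ 0, so '.toNat' is exact.
def encode_connect_four_board_alt (board : String) : Int × Int :=
  let st := board.toList.foldl
    (fun (st : Int × Int × Int × Int) (ch : Char) =>
      if ch = ',' then (st.1, st.2.1, st.2.2.1 + 1, 0)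
      else if ch = 'y' then
        (PySem.Int.bor st.1 (1 <<< (st.2.2.1 * 7 + st.2.2.2).toNat),
         PySem.Int.bor st.2.1 (1 <<< (st.2.2.1 * 7 + st.2.2.2).toNat), st.2.2.1, st.2.2.2 + 1)
      else if ch = 'r' then
        (st.1, PySem.Int.bor st.2.1 (1 <<< (st.2.2.1 * 7 + st.2.2.2).toNat), st.2.2.1, st.2.2.2 + 1)
      else (st.1, st.2.1, st.2.2.1, st.2.2.2 + 1))
    (0, 0, 0, 0)
  (st.1, st.2.1)

-- ===== PRECONDITION & SPEC =====
def Spec_encode_connect_four_board (board : String) (out : Int × Int) : Prop := out = encode_connect_four_board_alt board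
instance (board : String) (out : Int × Int) : Decidable (Spec_encode_connect_four_board board out) := by unfold Spec_encode_connect_four_board; infer_instance

-- ===== CLAIM (what is proved, stated in full; the proofs are below) =====
def Claim_equal_encode_connect_four_board : Prop := ∀ (board : String), Dom_encode_connect_four_board board → Spec_encode_connect_four_board board (encode_connect_four_board board)

-- ===== LEMMAS AND PROOFS =====

-- the bit for column ci, row ti
def pvBit (ci ti : Int) : Int := 1 <<< (ci * 7 + ti).toNat

-- structural form of splitting on ','
def pvSplit1 : List Char → List (List Char)
  | [] => [[]]
  | c :: rest => if c = ',' then [] :: pvSplit1 rest else (pvSplit1 rest).modifyHead (c :: ·)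

def pvInnerA (ci : Int) (st : Int × Int) (ti : Int) (c : Char) : Int × Int :=
  if c = 'y' then
    (PySem.Int.bor st.1 (pvBit ci ti),
     PySem.Int.bor st.2 (PySem.Int.bor st.1 (pvBit ci ti)))
  else if c = 'r' then (st.1, PySem.Int.bor st.2 (pvBit ci ti))
  else st

def pvInnerB (ci : Int) (st : Int × Int) (ti : Int) (c : Char) : Int × Int :=
  if c = 'y' then (PySem.Int.bor st.1 (pvBit ci ti), PySem.Int.bor st.2 (pvBit ci ti))
  else if c = 'r' then (st.1, PySem.Int.bor st.2 (pvBit ci ti))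
  else st

def pvColA (ci : Int) : Int → (Int × Int) → List Char → Int × Int
  | _, st, [] => st
  | t, st, c :: cs => pvColA ci (t + 1) (pvInnerA ci st t c) cs

def pvColB (ci : Int) : Int → (Int × Int) → List Char → Int × Int
  | _, st, [] => st
  | t, st, c :: cs => pvColB ci (t + 1) (pvInnerB ci st t c) cs

def pvOuterA : Int → (Int × Int) → List (List Char) → Int × Int
  | _, st, [] => st
  | ci, st, col :: rest => pvOuterA (ci + 1) (pvColA ci 0 st col) rest

def pvOuterB : Int → (Int × Int) → List (List Char) → Int × Int
  | _, st, [] => st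
  | ci, st, col :: rest => pvOuterB (ci + 1) (pvColB ci 0 st col) rest

-- B's scan mid-column: finish the first segment from token index t, then the rest from 0
def pvProc (ci t : Int) (st : Int × Int) : List (List Char) → Int × Int
  | [] => st
  | col :: rest => pvOuterB (ci + 1) (pvColB ci t st col) rest

-- invariant carried by both programs' states: masks are nonnegative and token_mask absorbs yellow_tokens
def pvInv (y m : Int) : Prop := 0 ≤ y ∧ 0 ≤ m ∧ PySem.Int.bor m y = m




lemma pvBit_nonneg (ci ti : Int) : 0 ≤ pvBit ci ti := by
  unfold pvBit
  exact Int.natCast_nonneg _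

lemma pvBor_nonneg {a b : Int} (ha : 0 ≤ a) (hb : 0 ≤ b) : 0 ≤ PySem.Int.bor a b := by
  rw [PySem.Int.bor_of_nonneg ha hb]
  exact Int.natCast_nonneg _

lemma pvNatLor_absorb (m y b : Nat) (h : m ||| y = m) :
    (m ||| b) ||| (y ||| b) = m ||| b ∧ m ||| (y ||| b) = m ||| b ∧ (m ||| b) ||| y = m ||| b := by
  refine ⟨?_, ?_, ?_⟩ <;>
  · apply Nat.eq_of_testBit_eq
    intro i
    have hbit := congrArg (fun n => Nat.testBit n i) h
    simp only [Nat.testBit_or] at hbit ⊢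
    cases hmi : m.testBit i <;> cases hyi : y.testBit i <;> cases hbi : b.testBit i <;>
      simp_all

lemma pvBor_absorb {m y b : Int} (hm : 0 ≤ m) (hy : 0 ≤ y) (hb : 0 ≤ b)
    (h : PySem.Int.bor m y = m) :
    PySem.Int.bor (PySem.Int.bor m b) (PySem.Int.bor y b) = PySem.Int.bor m b ∧
      PySem.Int.bor m (PySem.Int.bor y b) = PySem.Int.bor m b ∧
      PySem.Int.bor (PySem.Int.bor m b) y = PySem.Int.bor m b := by
  rw [PySem.Int.bor_of_nonneg hm hy] at h
  have h' : m.toNat ||| y.toNat = m.toNat := by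
    have := congrArg Int.toNat h
    simpa using this
  obtain ⟨h1, h2, h3⟩ := pvNatLor_absorb m.toNat y.toNat b.toNat h'
  have hmb : (0:Int) ≤ PySem.Int.bor m b := pvBor_nonneg hm hb
  have hyb : (0:Int) ≤ PySem.Int.bor y b := pvBor_nonneg hy hb
  refine ⟨?_, ?_, ?_⟩
  · rw [PySem.Int.bor_of_nonneg hmb hyb, PySem.Int.bor_of_nonneg hm hb,
      PySem.Int.bor_of_nonneg hy hb]
    simp only [Int.toNat_natCast]
    rw [h1]
  · rw [PySem.Int.bor_of_nonneg hy hb,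
      PySem.Int.bor_of_nonneg hm (Int.natCast_nonneg _), PySem.Int.bor_of_nonneg hm hb]
    simp only [Int.toNat_natCast]
    rw [h2]
  · rw [PySem.Int.bor_of_nonneg hmb hy, PySem.Int.bor_of_nonneg hm hb]
    simp only [Int.toNat_natCast]
    rw [h3]

lemma pvInnerAB (ci t : Int) (y m : Int) (c : Char) (h : pvInv y m) :
    pvInnerA ci (y, m) t c = pvInnerB ci (y, m) t c ∧
      pvInv (pvInnerB ci (y, m) t c).1 (pvInnerB ci (y, m) t c).2 := by
  obtain ⟨hy, hm, habs⟩ := h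
  have hb := pvBit_nonneg ci t
  obtain ⟨h1, h2, h3⟩ := pvBor_absorb hm hy hb habs
  unfold pvInnerA pvInnerB pvInv
  by_cases hcy : c = 'y'
  · simp only [hcy, reduceIte]
    exact ⟨by rw [h2], pvBor_nonneg hy hb, pvBor_nonneg hm hb, h1⟩
  · by_cases hcr : c = 'r'
    · simp only [hcr, reduceIte]
      exact ⟨rfl, hy, pvBor_nonneg hm hb, h3⟩
    · simp only [if_neg hcy, if_neg hcr]
      exact ⟨trivial, hy, hm, habs⟩

lemma pvColAB (ci : Int) : ∀ (col : List Char) (t y m : Int), pvInv y m →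
    pvColA ci t (y, m) col = pvColB ci t (y, m) col ∧
      pvInv (pvColB ci t (y, m) col).1 (pvColB ci t (y, m) col).2 := by
  intro col
  induction col with
  | nil => intro t y m h; exact ⟨rfl, h⟩
  | cons c cs ih =>
    intro t y m h
    obtain ⟨he, hinv⟩ := pvInnerAB ci t y m c h
    have hrec := ih (t + 1) (pvInnerB ci (y, m) t c).1 (pvInnerB ci (y, m) t c).2 hinv
    simp only [pvColA, pvColB, he]
    simpa using hrec

lemma pvOuterAB : ∀ (cols : List (List Char)) (ci y m : Int), pvInv y m →
    pvOuterA ci (y, m) cols = pvOuterB ci (y, m) cols := by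
  intro cols
  induction cols with
  | nil => intro ci y m _; rfl
  | cons col rest ih =>
    intro ci y m h
    obtain ⟨he, hinv⟩ := pvColAB ci col 0 y m h
    have hrec := ih (ci + 1) (pvColB ci 0 (y, m) col).1 (pvColB ci 0 (y, m) col).2 hinv
    simp only [pvOuterA, pvOuterB, he]
    simpa using hrec

-- characterisation of PySem's fuel-based splitOn on the one-character separator [',']
lemma pvGo_spec : ∀ (fuel : Nat) (l cur : List Char) (acc : List (List Char)),
    l.length < fuel →
    PySem.Chars.splitOn.go [','] fuel l cur acc
      = acc.reverse ++ (pvSplit1 l).modifyHead (cur.reverse ++ ·) := by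
  intro fuel
  induction fuel with
  | zero => intro l cur acc h; omega
  | succ n ih =>
    intro l cur acc h
    cases l with
    | nil =>
      simp [PySem.Chars.splitOn.go, pvSplit1, List.modifyHead]
    | cons c rest =>
      by_cases hc : c = ','
      · subst hc
        have hstep : PySem.Chars.splitOn.go [','] (n + 1) (',' :: rest) cur acc
            = PySem.Chars.splitOn.go [','] n rest [] (cur.reverse :: acc) := by
          simp [PySem.Chars.splitOn.go, List.isPrefixOf]
        rw [hstep, ih rest [] (cur.reverse :: acc) (by simp at h; omega)]
        simp [pvSplit1]
        cases hs : pvSplit1 rest <;> simp [List.modifyHead]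
      · have hstep : PySem.Chars.splitOn.go [','] (n + 1) (c :: rest) cur acc
            = PySem.Chars.splitOn.go [','] n rest (c :: cur) acc := by
          simp [PySem.Chars.splitOn.go, List.isPrefixOf]
          intro hcc
          exact absurd hcc.symm hc
        rw [hstep, ih rest (c :: cur) acc (by simp at h; omega)]
        simp only [pvSplit1, if_neg hc]
        cases hs : pvSplit1 rest <;> simp [List.modifyHead]

lemma pvSplit1_ne_nil (s : List Char) : pvSplit1 s ≠ [] := by
  induction s with
  | nil => simp [pvSplit1]
  | cons c rest ih =>
    simp only [pvSplit1]
    split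
    · simp
    · cases h : pvSplit1 rest with
      | nil => exact absurd h ih
      | cons a tl => simp [List.modifyHead]

lemma pvSplitOn_eq (s : List Char) : PySem.Chars.splitOn s [','] = pvSplit1 s := by
  unfold PySem.Chars.splitOn
  rw [pvGo_spec (s.length + 1) s [] [] (by omega)]
  cases h : pvSplit1 s with
  | nil => exact absurd h (pvSplit1_ne_nil s)
  | cons a tl => simp [List.modifyHead]

-- A's nested enumerate folds are the structural recursions pvColA / pvOuterA
lemma pvColA_enum (ci : Int) : ∀ (xs : List Char) (t : Int) (st : Int × Int),
    (PySem.List.enumerate xs t).foldl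
      (fun (st2 : Int × Int) (q : Int × Char) =>
        if q.2 = 'y' then
          let y := PySem.Int.bor st2.1 (1 <<< (ci * 7 + q.1).toNat)
          (y, PySem.Int.bor st2.2 y)
        else if q.2 = 'r' then
          (st2.1, PySem.Int.bor st2.2 (1 <<< (ci * 7 + q.1).toNat))
        else st2)
      st = pvColA ci t st xs := by
  intro xs
  induction xs with
  | nil => intro t st; simp [PySem.List.enumerate_nil, pvColA]
  | cons x xs ih =>
    intro t st
    rw [PySem.List.enumerate_cons, List.foldl_cons, ih (t + 1)]
    rfl

lemma pvOuterA_enum : ∀ (cols : List String) (ci : Int) (st : Int × Int),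
    (PySem.List.enumerate cols ci).foldl
      (fun (st : Int × Int) (p : Int × String) =>
        (PySem.List.enumerate p.2.toList).foldl
          (fun (st2 : Int × Int) (q : Int × Char) =>
            if q.2 = 'y' then
              let y := PySem.Int.bor st2.1 (1 <<< (p.1 * 7 + q.1).toNat)
              (y, PySem.Int.bor st2.2 y)
            else if q.2 = 'r' then
              (st2.1, PySem.Int.bor st2.2 (1 <<< (p.1 * 7 + q.1).toNat))
            else st2)
          st)
      st = pvOuterA ci st (cols.map String.toList) := by
  intro cols
  induction cols with
  | nil => intro ci st; simp [PySem.List.enumerate_nil, pvOuterA]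
  | cons col rest ih =>
    intro ci st
    rw [PySem.List.enumerate_cons, List.foldl_cons, ih (ci + 1)]
    simp only [List.map_cons, pvOuterA]
    rw [← pvColA_enum ci col.toList 0 st]

lemma pvProc_step (ci t : Int) (st : Int × Int) (c : Char) (hc : c ≠ ',') (s : List Char) :
    pvProc ci t st (pvSplit1 (c :: s)) = pvProc ci (t + 1) (pvInnerB ci st t c) (pvSplit1 s) := by
  cases h : pvSplit1 s with
  | nil => exact absurd h (pvSplit1_ne_nil s)
  | cons a tl =>
    simp only [pvSplit1, if_neg hc, h, List.modifyHead]
    simp [pvProc, pvColB]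

-- B's flat scan equals the nested clean fold over the split
lemma pvScan_eq : ∀ (s : List Char) (y m ci t : Int),
    ((s.foldl
      (fun (st : Int × Int × Int × Int) (ch : Char) =>
        if ch = ',' then (st.1, st.2.1, st.2.2.1 + 1, 0)
        else if ch = 'y' then
          (PySem.Int.bor st.1 (1 <<< (st.2.2.1 * 7 + st.2.2.2).toNat),
           PySem.Int.bor st.2.1 (1 <<< (st.2.2.1 * 7 + st.2.2.2).toNat), st.2.2.1, st.2.2.2 + 1)
        else if ch = 'r' then
          (st.1, PySem.Int.bor st.2.1 (1 <<< (st.2.2.1 * 7 + st.2.2.2).toNat), st.2.2.1, st.2.2.2 + 1)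
        else (st.1, st.2.1, st.2.2.1, st.2.2.2 + 1))
      (y, m, ci, t)).1,
     (s.foldl
      (fun (st : Int × Int × Int × Int) (ch : Char) =>
        if ch = ',' then (st.1, st.2.1, st.2.2.1 + 1, 0)
        else if ch = 'y' then
          (PySem.Int.bor st.1 (1 <<< (st.2.2.1 * 7 + st.2.2.2).toNat),
           PySem.Int.bor st.2.1 (1 <<< (st.2.2.1 * 7 + st.2.2.2).toNat), st.2.2.1, st.2.2.2 + 1)
        else if ch = 'r' then
          (st.1, PySem.Int.bor st.2.1 (1 <<< (st.2.2.1 * 7 + st.2.2.2).toNat), st.2.2.1, st.2.2.2 + 1)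
        else (st.1, st.2.1, st.2.2.1, st.2.2.2 + 1))
      (y, m, ci, t)).2.1) = pvProc ci t (y, m) (pvSplit1 s) := by
  intro s
  induction s with
  | nil =>
    intro y m ci t
    simp [pvSplit1, pvProc, pvColB, pvOuterB]
  | cons c s ih =>
    intro y m ci t
    by_cases hc : c = ','
    · subst hc
      simp only [List.foldl_cons, reduceIte]
      rw [ih y m (ci + 1) 0]
      have h1 : pvSplit1 (',' :: s) = [] :: pvSplit1 s := by simp [pvSplit1]
      rw [h1]
      cases hs : pvSplit1 s with
      | nil => exact absurd hs (pvSplit1_ne_nil s)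
      | cons a tl => simp [pvProc, pvColB, pvOuterB]
    · rw [pvProc_step ci t (y, m) c hc s]
      by_cases hcy : c = 'y'
      · subst hcy
        simp only [List.foldl_cons, reduceIte]
        rw [ih]
        simp [pvInnerB, pvBit]
      · by_cases hcr : c = 'r'
        · subst hcr
          simp only [List.foldl_cons, reduceIte]
          rw [ih]
          simp [pvInnerB, pvBit]
        · simp only [List.foldl_cons, if_neg hc, if_neg hcy, if_neg hcr]
          rw [ih]
          simp [pvInnerB, if_neg hcy, if_neg hcr]

-- ===== VERDICT (by name: the statement is the Claim_ definition above) =====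
theorem encode_connect_four_board_spec : Claim_equal_encode_connect_four_board := by
  intro board _
  unfold Spec_encode_connect_four_board
  have hinv0 : pvInv 0 0 := ⟨le_refl 0, le_refl 0, by decide⟩
  have hsplit : ((PySem.Str.split? board ",").getD []).map String.toList
      = pvSplit1 board.toList := by
    have h := PySem.Str.split?_map board ","
    have hsep : ("," : String).toList = [','] := rfl
    rw [hsep] at h
    have hchars : PySem.Chars.split? board.toList [',']
        = some (PySem.Chars.splitOn board.toList [',']) := by
      simp [PySem.Chars.split?]
    cases e : PySem.Str.split? board "," with
    | none => rw [e, hchars] at h; simp at h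
    | some cs =>
      rw [e, hchars] at h
      simp only [Option.map_some, Option.some.injEq] at h
      simp only [Option.getD_some]
      rw [h, pvSplitOn_eq]
  have hA : encode_connect_four_board board
      = pvOuterA 0 (0, 0) (((PySem.Str.split? board ",").getD []).map String.toList) :=
    pvOuterA_enum ((PySem.Str.split? board ",").getD []) 0 (0, 0)
  have hB : encode_connect_four_board_alt board
      = pvProc 0 0 (0, 0) (pvSplit1 board.toList) :=
    pvScan_eq board.toList 0 0 0 0
  rw [hA, hB, hsplit, pvOuterAB (pvSplit1 board.toList) 0 0 0 hinv0]
  cases hcols : pvSplit1 board.toList with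
  | nil => exact absurd hcols (pvSplit1_ne_nil _)
  | cons a tl => simp [pvProc, pvOuterB]
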